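-- pv_equiv track=rewrite | github.com/XimeCode/ENGR102 | Lab 7/no_three_in_a_line.py | no_three_in_line
-- ===== SOURCE A (Python) =====
-- def no_three_in_line(n):
--
--     def collinear(p1, p2, p3):
--         (x1, y1), (x2, y2), (x3, y3) = p1, p2, p3
--         return x1*(y2 - y3) + x2*(y3 - y1) + x3*(y1 - y2) == 0 #if area euqals 0, then the three points are collinear
--
--     points = []
--
--     #produce every integer grid point in row order
--     potentials = [(x, y) for x in range(n) for y in range(n)]
--
--     for potential in potentials:
--         valid = True
--         #checks the candidate against all pairs of points currently in points
--         for i in range(len(points)):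
--             if not valid:
--                 break
--             for j in range(i + 1, len(points)):
--                 if collinear(points[i], points[j], potential): #if existing pair collinear, mark invalid
--                     valid = False
--                     break
--         if valid:
--             points.append(potential)
--
--     return points
-- ===== SOURCE B (Python) =====
-- from math import gcd
--
-- def no_three_in_line(n):
--     points = []
--     for x in range(n):
--         for y in range(n):
--             seen = set()
--             ok = True
--             for (px, py) in points:
--                 dx = px - x
--                 dy = py - y
--                 g = gcd(dx, dy)
--                 ax, ay = dx // g, dy // g
--                 if ax < 0 or (ax == 0 and ay < 0):
--                     ax, ay = -ax, -ay
--                 if (ax, ay) in seen: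
--                     ok = False
--                     break
--                 seen.add((ax, ay))
--             if ok:
--                 points.append((x, y))
--     return points
-- ===== Notes on version B (the rewrite author's own statement) =====
-- stated objective: faster
-- what changed: Per candidate, instead of testing collinearity against every PAIR of already-placed points, B scans the placed points once, gcd-normalizing the direction from the candidate to each point and hashing it into a set; a repeated direction means two placed points are collinear with the candidate.
import Mathlib
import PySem

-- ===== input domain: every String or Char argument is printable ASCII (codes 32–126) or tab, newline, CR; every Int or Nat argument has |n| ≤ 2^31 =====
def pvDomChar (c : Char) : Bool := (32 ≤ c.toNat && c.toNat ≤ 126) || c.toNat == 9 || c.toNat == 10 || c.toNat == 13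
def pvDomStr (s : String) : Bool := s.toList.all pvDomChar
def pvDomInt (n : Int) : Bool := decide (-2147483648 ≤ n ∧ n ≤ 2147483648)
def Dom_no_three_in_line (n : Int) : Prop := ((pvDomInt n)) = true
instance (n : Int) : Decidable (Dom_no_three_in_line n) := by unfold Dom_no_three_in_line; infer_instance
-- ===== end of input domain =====

-- B replaces A's per-candidate scan over all PAIRS of placed points by a single scan that
-- hashes the gcd-normalized direction from the candidate to each placed point into a set:
-- a repeated direction means two placed points are collinear with the candidate (faster).

-- ===== PORT A =====
def pvCollinear (p1 p2 p3 : Int × Int) : Bool :=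
  decide (p1.1 * (p2.2 - p3.2) + p2.1 * (p3.2 - p1.2) + p3.1 * (p1.2 - p2.2) = 0)

-- inner 'for j' loop: returns the valid flag (false on first collinear pair, i.e. break)
def pvInnerA (p : Int × Int) (rest : List (Int × Int)) (pot : Int × Int) : Bool :=
  match rest with
  | [] => true
  | q :: qs => if pvCollinear p q pot then false else pvInnerA p qs pot

-- outer 'for i' loop with the 'if not valid: break'
def pvOuterA (pts : List (Int × Int)) (pot : Int × Int) : Bool :=
  match pts with
  | [] => true
  | p :: rest => if pvInnerA p rest pot then pvOuterA rest pot else false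

def no_three_in_line (n : Int) : List (Int × Int) :=
  let potentials := (PySem.List.pyRange 0 n 1).flatMap
    (fun x => (PySem.List.pyRange 0 n 1).map (fun y => (x, y)))
  potentials.foldl (fun points pot =>
    if pvOuterA points pot then points ++ [pot] else points) []

-- ===== PORT B =====
-- gcd-normalized direction: divide by math.gcd, then fix the sign (Source B's pvNorm inline code)
def pvNorm (dx dy : Int) : Int × Int :=
  let g : Int := (Int.gcd dx dy : Int)
  let ax := PySem.Int.floordiv dx g
  let ay := PySem.Int.floordiv dy g
  if ax < 0 ∨ (ax = 0 ∧ ay < 0) then (-ax, -ay) else (ax, ay)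

-- the 'for (px, py) in points' loop with the seen-set and break
def pvLoopB (x y : Int) (pts : List (Int × Int)) (seen : PySem.Set (Int × Int)) : Bool :=
  match pts with
  | [] => true
  | (px, py) :: rest =>
    let d := pvNorm (px - x) (py - y)
    if PySem.Set.contains seen d then false
    else pvLoopB x y rest (PySem.Set.add seen d)

def no_three_in_line_alt (n : Int) : List (Int × Int) :=
  (PySem.List.pyRange 0 n 1).foldl (fun points x =>
    (PySem.List.pyRange 0 n 1).foldl (fun points y =>
      if pvLoopB x y points PySem.Set.empty then points ++ [(x, y)] else points) points) []

-- ===== PRECONDITION & SPEC =====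
def Spec_no_three_in_line (n : Int) (out : List (Int × Int)) : Prop := out = no_three_in_line_alt n
instance (n : Int) (out : List (Int × Int)) : Decidable (Spec_no_three_in_line n out) := by unfold Spec_no_three_in_line; infer_instance

-- ===== CLAIM (what is proved, stated in full; the proofs are below) =====
def Claim_equal_no_three_in_line : Prop := ∀ (n : Int), Dom_no_three_in_line n → Spec_no_three_in_line n (no_three_in_line n)

-- ===== LEMMAS AND PROOFS =====

-- sign-canonicalisation used by pvNorm, as a proof-side function
def pvCanon (u : Int × Int) : Int × Int :=
  if u.1 < 0 ∨ (u.1 = 0 ∧ u.2 < 0) then (-u.1, -u.2) else u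

theorem pvNorm_eq_canon (a b : Int) (h : ¬(a = 0 ∧ b = 0)) :
    pvNorm a b = pvCanon (a / (Int.gcd a b : Int), b / (Int.gcd a b : Int)) := by
  have hg : 0 < (Int.gcd a b : Int) := by
    have : Int.gcd a b ≠ 0 := by
      simp only [ne_eq, Int.gcd_eq_zero_iff]; tauto
    omega
  simp [pvNorm, pvCanon, PySem.Int.floordiv_eq_ediv_of_pos hg]

theorem pvCanon_neg (u : Int × Int) (h : u ≠ (0, 0)) :
    pvCanon (-u.1, -u.2) = pvCanon u := by
  obtain ⟨a, b⟩ := u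
  simp only [pvCanon]
  have hab : ¬(a = 0 ∧ b = 0) := by simpa [Prod.ext_iff] using h
  split_ifs <;> simp_all <;> omega

theorem pvCanon_cases (u : Int × Int) : pvCanon u = u ∨ pvCanon u = (-u.1, -u.2) := by
  simp only [pvCanon]; split_ifs <;> simp

-- core: for nonzero direction vectors, equal normalized directions ↔ zero cross product
theorem pvNorm_eq_iff (a b c d : Int) (h1 : ¬(a = 0 ∧ b = 0)) (h2 : ¬(c = 0 ∧ d = 0)) :
    pvNorm a b = pvNorm c d ↔ a * d - c * b = 0 := by
  have hg1' : 0 < Int.gcd a b := Nat.pos_of_ne_zero (by simp only [ne_eq, Int.gcd_eq_zero_iff]; tauto)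
  have hg2' : 0 < Int.gcd c d := Nat.pos_of_ne_zero (by simp only [ne_eq, Int.gcd_eq_zero_iff]; tauto)
  have hg1 : (0 : Int) < (Int.gcd a b : Int) := by exact_mod_cast hg1'
  have hg2 : (0 : Int) < (Int.gcd c d : Int) := by exact_mod_cast hg2'
  set g1 : Int := (Int.gcd a b : Int) with hg1def
  set g2 : Int := (Int.gcd c d : Int) with hg2def
  set a' : Int := a / g1 with ha'def
  set b' : Int := b / g1 with hb'def
  set c' : Int := c / g2 with hc'def
  set d' : Int := d / g2 with hd'def
  have ha : g1 * a' = a := Int.mul_ediv_cancel' (Int.gcd_dvd_left a b)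
  have hb : g1 * b' = b := Int.mul_ediv_cancel' (Int.gcd_dvd_right a b)
  have hcc : g2 * c' = c := Int.mul_ediv_cancel' (Int.gcd_dvd_left c d)
  have hdd : g2 * d' = d := Int.mul_ediv_cancel' (Int.gcd_dvd_right c d)
  have hcop1 : Int.gcd a' b' = 1 := Int.gcd_div_gcd_div_gcd hg1'
  have hcop2 : Int.gcd c' d' = 1 := Int.gcd_div_gcd_div_gcd hg2'
  have hab' : ¬(a' = 0 ∧ b' = 0) := by
    rintro ⟨h1', h2'⟩; exact h1 ⟨by rw [← ha, h1', mul_zero], by rw [← hb, h2', mul_zero]⟩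
  have hkey : a * d - c * b = g1 * g2 * (a' * d' - c' * b') := by
    rw [← ha, ← hb, ← hcc, ← hdd]; ring
  rw [pvNorm_eq_canon a b h1, pvNorm_eq_canon c d h2, ← hg1def, ← hg2def,
    ← ha'def, ← hb'def, ← hc'def, ← hd'def]
  constructor
  · intro h
    have hud : (a' = c' ∧ b' = d') ∨ (a' = -c' ∧ b' = -d') := by
      rcases pvCanon_cases (a', b') with h1' | h1' <;>
        rcases pvCanon_cases (c', d') with h2' | h2' <;>
        rw [h1', h2'] at h <;> simp only [Prod.mk.injEq] at h ⊢ <;>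
        [exact Or.inl h; exact Or.inr ⟨by omega, by omega⟩;
         exact Or.inr ⟨by omega, by omega⟩; exact Or.inl ⟨by omega, by omega⟩]
    rw [hkey]
    rcases hud with ⟨hx, hy⟩ | ⟨hx, hy⟩ <;> rw [hx, hy] <;> ring
  · intro h
    have hX : a' * d' = c' * b' := by
      have h0 : g1 * g2 * (a' * d' - c' * b') = 0 := by rw [← hkey]; exact h
      have hgg : g1 * g2 ≠ 0 := ne_of_gt (mul_pos hg1 hg2)
      have := (mul_eq_zero.mp h0).resolve_left hgg
      linarith
    have hco1 : IsCoprime a' b' := Int.isCoprime_iff_gcd_eq_one.mpr hcop1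
    have hco2 : IsCoprime c' d' := Int.isCoprime_iff_gcd_eq_one.mpr hcop2
    have hdvd1 : a' ∣ c' := hco1.dvd_of_dvd_mul_right ⟨d', hX.symm⟩
    have hdvd2 : c' ∣ a' := hco2.dvd_of_dvd_mul_right ⟨b', hX⟩
    have habs : a'.natAbs = c'.natAbs :=
      Nat.dvd_antisymm (Int.natAbs_dvd_natAbs.mpr hdvd1) (Int.natAbs_dvd_natAbs.mpr hdvd2)
    rcases Int.natAbs_eq_natAbs_iff.mp habs with hac | hac
    · by_cases hc0 : c' = 0
      · -- both first components are 0, second components are ±1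
        have ha0 : a' = 0 := by rw [hac, hc0]
        have hb1 : b' = 1 ∨ b' = -1 := by
          have : b'.natAbs = 1 := by
            have := hcop1; rw [ha0] at this; simpa [Int.gcd] using this
          exact Int.natAbs_eq_iff.mp this
        have hd1 : d' = 1 ∨ d' = -1 := by
          have : d'.natAbs = 1 := by
            have := hcop2; rw [hc0] at this; simpa [Int.gcd] using this
          exact Int.natAbs_eq_iff.mp this
        rw [ha0, hc0]
        rcases hb1 with hbv | hbv <;> rcases hd1 with hdv | hdv <;> rw [hbv, hdv] <;> simp [pvCanon]
      · have hdb : d' = b' := by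
          apply mul_left_cancel₀ hc0
          rw [← hX, hac]
        rw [hac, hdb]
    · by_cases hc0 : c' = 0
      · have ha0 : a' = 0 := by rw [hac, hc0, neg_zero]
        have hb1 : b' = 1 ∨ b' = -1 := by
          have : b'.natAbs = 1 := by
            have := hcop1; rw [ha0] at this; simpa [Int.gcd] using this
          exact Int.natAbs_eq_iff.mp this
        have hd1 : d' = 1 ∨ d' = -1 := by
          have : d'.natAbs = 1 := by
            have := hcop2; rw [hc0] at this; simpa [Int.gcd] using this
          exact Int.natAbs_eq_iff.mp this
        rw [ha0, hc0]
        rcases hb1 with hbv | hbv <;> rcases hd1 with hdv | hdv <;> rw [hbv, hdv] <;> simp [pvCanon]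
      · have hdb : d' = -b' := by
          have : c' * d' = -(c' * b') := by
            rw [← hX, hac]; ring
          have h2 : c' * d' = c' * (-b') := by rw [this]; ring
          exact mul_left_cancel₀ hc0 h2
        have hcd : (c', d') = (-a', -b') := by
          rw [hac, hdb]; simp
        rw [hcd]
        exact (pvCanon_neg (a', b') (by simpa [Prod.ext_iff] using hab')).symm

-- A's inner loop: true iff no element of rest is collinear with p and pot
theorem pvInnerA_true (p : Int × Int) (rest : List (Int × Int)) (pot : Int × Int) :
    pvInnerA p rest pot = true ↔ ∀ q ∈ rest, pvCollinear p q pot = false := by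
  induction rest with
  | nil => simp [pvInnerA]
  | cons q qs ih =>
    simp only [pvInnerA]
    by_cases h : pvCollinear p q pot = true
    · simp [h]
    · simp only [Bool.not_eq_true] at h
      simp [h, ih]

theorem pvOuterA_true (pts : List (Int × Int)) (pot : Int × Int) :
    pvOuterA pts pot = true ↔ pts.Pairwise (fun p q => pvCollinear p q pot = false) := by
  induction pts with
  | nil => simp [pvOuterA]
  | cons p rest ih =>
    simp only [pvOuterA, List.pairwise_cons]
    by_cases h : pvInnerA p rest pot = true
    · rw [if_pos h, ih]
      have hall := (pvInnerA_true p rest pot).mp h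
      exact ⟨fun hpw => ⟨fun q hq => hall q hq, hpw⟩, fun h' => h'.2⟩
    · simp only [if_neg h]
      constructor
      · intro hF; exact absurd hF (by simp)
      · rintro ⟨hall, -⟩
        exact absurd ((pvInnerA_true p rest pot).mpr hall) h

theorem pvLoopB_true (x y : Int) (pts : List (Int × Int)) (seen : PySem.Set (Int × Int)) :
    pvLoopB x y pts seen = true ↔
      (pts.map (fun p => pvNorm (p.1 - x) (p.2 - y))).Pairwise (· ≠ ·) ∧
      ∀ p ∈ pts, pvNorm (p.1 - x) (p.2 - y) ∉ seen := by
  induction pts generalizing seen with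
  | nil => simp [pvLoopB]
  | cons p rest ih =>
    obtain ⟨px, py⟩ := p
    simp only [pvLoopB]
    by_cases hc : PySem.Set.contains seen (pvNorm (px - x) (py - y)) = true
    · simp only [if_pos hc]
      rw [PySem.Set.contains_iff] at hc
      constructor
      · intro h; exact absurd h (by simp)
      · rintro ⟨-, hns⟩
        exact absurd (hns (px, py) (by simp)) (by simpa using hc)
    · have hc' : pvNorm (px - x) (py - y) ∉ seen := by
        rw [← PySem.Set.contains_iff]; simpa using hc
      simp only [if_neg hc, ih, List.map_cons, List.pairwise_cons, List.mem_map,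
        List.mem_cons]
      constructor
      · rintro ⟨hpw, hns⟩
        refine ⟨⟨?_, hpw⟩, ?_⟩
        · rintro e ⟨q, hq, rfl⟩
          have := hns q hq
          rw [PySem.Set.mem_add] at this
          intro he; exact this (Or.inr he.symm)
        · rintro q (rfl | hq)
          · exact hc'
          · have := hns q hq
            rw [PySem.Set.mem_add] at this
            intro hmem; exact this (Or.inl hmem)
      · rintro ⟨⟨hhead, hpw⟩, hns⟩
        refine ⟨hpw, ?_⟩
        intro q hq
        rw [PySem.Set.mem_add]
        rintro (hmem | heq)
        · exact hns q (Or.inr hq) hmem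
        · exact hhead _ ⟨q, hq, rfl⟩ heq.symm

-- cross-product form of A's collinearity test
theorem pvCollinear_eq (p q c : Int × Int) :
    pvCollinear p q c =
      decide ((p.1 - c.1) * (q.2 - c.2) - (q.1 - c.1) * (p.2 - c.2) = 0) := by
  simp only [pvCollinear, decide_eq_decide]
  constructor <;> intro h <;> linarith

-- per-candidate equivalence, for a candidate not among the placed points
theorem pvStep_eq (pts : List (Int × Int)) (c : Int × Int) (hc : c ∉ pts) :
    pvOuterA pts c = pvLoopB c.1 c.2 pts PySem.Set.empty := by
  have hB : pvLoopB c.1 c.2 pts PySem.Set.empty = true ↔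
      (pts.map (fun p => pvNorm (p.1 - c.1) (p.2 - c.2))).Pairwise (· ≠ ·) := by
    rw [pvLoopB_true]
    simp [PySem.Set.empty]
  have key : pvOuterA pts c = true ↔ pvLoopB c.1 c.2 pts PySem.Set.empty = true := by
    rw [pvOuterA_true, hB, List.pairwise_map]
    constructor <;> intro h <;>
      refine h.imp_of_mem ?_ <;> intro p q hp hq hpq
    · have hpne : ¬(p.1 - c.1 = 0 ∧ p.2 - c.2 = 0) := by
        intro ⟨h1, h2⟩
        exact hc (by
          have : p = c := by obtain ⟨a, b⟩ := p; obtain ⟨a', b'⟩ := c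
                             simp_all; omega
          rwa [← this])
      have hqne : ¬(q.1 - c.1 = 0 ∧ q.2 - c.2 = 0) := by
        intro ⟨h1, h2⟩
        exact hc (by
          have : q = c := by obtain ⟨a, b⟩ := q; obtain ⟨a', b'⟩ := c
                             simp_all; omega
          rwa [← this])
      rw [pvCollinear_eq] at hpq
      simp only [decide_eq_false_iff_not] at hpq
      rw [Ne, pvNorm_eq_iff _ _ _ _ hpne hqne]
      exact hpq
    · have hpne : ¬(p.1 - c.1 = 0 ∧ p.2 - c.2 = 0) := by
        intro ⟨h1, h2⟩
        exact hc (by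
          have : p = c := by obtain ⟨a, b⟩ := p; obtain ⟨a', b'⟩ := c
                             simp_all; omega
          rwa [← this])
      have hqne : ¬(q.1 - c.1 = 0 ∧ q.2 - c.2 = 0) := by
        intro ⟨h1, h2⟩
        exact hc (by
          have : q = c := by obtain ⟨a, b⟩ := q; obtain ⟨a', b'⟩ := c
                             simp_all; omega
          rwa [← this])
      rw [pvCollinear_eq]
      simp only [decide_eq_false_iff_not]
      rw [Ne, pvNorm_eq_iff _ _ _ _ hpne hqne] at hpq
      exact hpq
  cases hA : pvOuterA pts c <;> cases hBv : pvLoopB c.1 c.2 pts PySem.Set.empty <;>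
    simp_all

-- folding the two step functions over a duplicate-free candidate list gives the same points
theorem pvFold_eq (cands : List (Int × Int)) :
    ∀ pts : List (Int × Int), cands.Nodup → (∀ c ∈ cands, c ∉ pts) →
      cands.foldl (fun points pot =>
          if pvOuterA points pot then points ++ [pot] else points) pts =
      cands.foldl (fun points pot =>
          if pvLoopB pot.1 pot.2 points PySem.Set.empty then points ++ [pot] else points) pts := by
  induction cands with
  | nil => intro pts _ _; rfl
  | cons c rest ih =>
    intro pts hnd hnin
    simp only [List.foldl_cons]
    rw [pvStep_eq pts c (hnin c (by simp))]
    rcases List.nodup_cons.mp hnd with ⟨hcrest, hndr⟩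
    by_cases hv : pvLoopB c.1 c.2 pts PySem.Set.empty = true
    · simp only [if_pos hv]
      exact ih _ hndr (by
        intro c' hc'
        simp only [List.mem_append, List.mem_singleton]
        rintro (h | rfl)
        · exact hnin c' (by simp [hc']) h
        · exact hcrest hc')
    · simp only [if_neg hv]
      exact ih _ hndr (fun c' hc' => hnin c' (by simp [hc']))

-- ===== VERDICT (by name: the statement is the Claim_ definition above) =====
theorem no_three_in_line_spec : Claim_equal_no_three_in_line := by
  intro n _
  unfold Spec_no_three_in_line no_three_in_line no_three_in_line_alt
  have hmapfold : ∀ (x : Int) (pts : List (Int × Int)),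
      (PySem.List.pyRange 0 n 1).foldl (fun points y =>
        if pvLoopB x y points PySem.Set.empty then points ++ [(x, y)] else points) pts =
      ((PySem.List.pyRange 0 n 1).map (fun y => (x, y))).foldl (fun points pot =>
        if pvLoopB pot.1 pot.2 points PySem.Set.empty then points ++ [pot] else points) pts := by
    intro x pts
    rw [List.foldl_map]
  have hflat :
      (PySem.List.pyRange 0 n 1).foldl (fun points x =>
        (PySem.List.pyRange 0 n 1).foldl (fun points y =>
          if pvLoopB x y points PySem.Set.empty then points ++ [(x, y)] else points) points) [] =
      ((PySem.List.pyRange 0 n 1).flatMap (fun x => (PySem.List.pyRange 0 n 1).map (fun y => (x, y)))).foldl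
        (fun points pot =>
          if pvLoopB pot.1 pot.2 points PySem.Set.empty then points ++ [pot] else points) [] := by
    rw [List.foldl_flatMap]
    exact congrArg (fun f => List.foldl f ([] : List (Int × Int)) (PySem.List.pyRange 0 n 1))
      (funext fun pts => funext fun x => hmapfold x pts)
  rw [hflat]
  have hnodup : ((PySem.List.pyRange 0 n 1).flatMap
      (fun x => (PySem.List.pyRange 0 n 1).map (fun y => (x, y)))).Nodup := by
    have := List.Nodup.product (PySem.List.nodup_pyRange_one 0 n)
      (PySem.List.nodup_pyRange_one 0 n)
    simpa [List.product, SProd.sprod] using this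
  exact pvFold_eq _ [] hnodup (by simp)
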